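-- pv_equiv track=rewrite | github.com/anflorea/courses | fp/lab12/iterativ.py | compute_all_subsequences
-- ===== SOURCE A (Python) =====
-- def try_print(st, a, n):
--     summ = 0
--     new_a = []
--     for i in range(len(a)):
--         if (st[i]):
--             summ += a[i]
--             new_a.append(a[i])
--     if (len(new_a) and summ % n == 0):
--         print (new_a)
--         return (1)
--     return (0)
--
-- def compute_all_subsequences(a, n):
--     st = len(a) * [0] # lista se intializeaza la 0 ([0, 0, 0, 0])
--     ok = 1
--     final = 0
--     while ok:
--         i = 0
--         # se aduna 1 pe prima pozitie
--         # de exemplu pentru [1, 1, 0, 0] -> [2, 1, 0, 0]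
--         st[i] += 1
--         # trecerea peste unitate
--         while (st[i] > 1):
--             st[i + 1] += 1
--             st[i] = 0
--             i += 1
--         # trecerea peste unitate face asta [2, 1, 0, 0] -> [0, 2, 0, 0] -> [0, 0, 1, 0]
--         res = try_print(st, a, n)
--         if (res):
--             final = 1
--         ok2 = 1
--         for i in st:
--             if (i == 0):
--                 ok2 = 0
--         if ok2:
--             ok = 0
--     # return 0 if no subsequence was found, 1 if at least one was found
--     return (final)
-- ===== SOURCE B (Python) =====
-- def compute_all_subsequences(a, n):
--     # Dynamic programming over reachable residues mod n (return value only; does not print).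
--     residues = set()
--     for x in a:
--         residues |= {(r + x) % n for r in residues} | {x % n}
--     return 1 if 0 in residues else 0
-- ===== Notes on version B (the rewrite author's own statement) =====
-- stated objective: faster
-- what changed: Replaces A's exhaustive odometer enumeration of all 2^n subsequences (increment-with-carry state list, per-state rebuild and sum of the subsequence) with a single-pass dynamic program maintaining the set of residues mod n reachable as sums of nonempty subsequences, returning 1 iff residue 0 is reachable; B does not print the subsequences (the proved equivalence is about the return value).
-- crash fix: On a = [] Python A raises IndexError (st[0] += 1 on the empty state list) for every n, while B's loop body never runs and it returns 0; on nonempty a with n = 0 both A and B raise ZeroDivisionError, so only a = [] is in Raises_. — e.g. on compute_all_subsequences([], 5): A raises IndexError, B returns 0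
import Mathlib
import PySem

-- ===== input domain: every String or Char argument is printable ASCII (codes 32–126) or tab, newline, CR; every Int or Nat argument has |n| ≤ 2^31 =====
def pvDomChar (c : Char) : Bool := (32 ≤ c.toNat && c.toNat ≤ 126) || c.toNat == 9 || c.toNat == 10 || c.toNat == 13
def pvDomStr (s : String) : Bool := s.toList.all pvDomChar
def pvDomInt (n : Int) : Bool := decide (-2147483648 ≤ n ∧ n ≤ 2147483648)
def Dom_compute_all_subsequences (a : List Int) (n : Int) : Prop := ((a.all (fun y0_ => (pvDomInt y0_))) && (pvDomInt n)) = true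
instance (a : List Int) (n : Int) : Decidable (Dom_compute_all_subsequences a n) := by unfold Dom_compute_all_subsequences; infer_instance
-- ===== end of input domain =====

-- B replaces A's exhaustive odometer enumeration of all 2^n subsequences by a
-- dynamic program over the set of residues mod n reachable as sums of nonempty
-- subsequences (objective: faster).  Equivalence is about the RETURN value only:
-- A prints each qualifying subsequence, B prints nothing.

-- ===== PORT A =====
-- try_print(st, a, n): the for-loop over range(len(a)) accumulates (summ, new_a);
-- st[i] / a[i] are ported as `[·]?` (the index is the nonnegative loop counter; none = IndexError).
-- `summ % n` is PySem.Int.mod; n = 0 (ZeroDivisionError whenever new_a is nonempty) is excluded by Pre_.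
def pvTryPrint (st a : List Int) (n : Int) : Option Int :=
  match (List.range a.length).foldl
      (fun acc i =>
        match acc with
        | none => none
        | some (summ, new_a) =>
          match st[i]?, a[i]? with
          | some s, some x => if s ≠ 0 then some (summ + x, new_a ++ [x]) else some (summ, new_a)
          | _, _ => none)
      (some ((0 : Int), ([] : List Int))) with
  | none => none
  | some (summ, new_a) =>
    if new_a.length ≠ 0 ∧ PySem.Int.mod summ n = 0 then some 1 else some 0

-- the inner `while st[i] > 1:` carry loop of A (i only grows; none = IndexError)
def pvCarry (st : List Int) (i : Nat) : Option (List Int) :=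
  match st[i]? with
  | none => none
  | some v =>
    if v > 1 then
      match h : st[i+1]? with
      | none => none
      | some w => pvCarry ((st.set (i+1) (w+1)).set i 0) (i+1)
    else some st
termination_by st.length - i
decreasing_by
  have hi : i + 1 < st.length := (List.getElem?_eq_some_iff.mp h).1
  simp only [List.length_set]
  omega

-- the outer `while ok:` loop of A; fuel 2 ^ len st strictly exceeds the number of
-- iterations the odometer can make (proved below), so the fuel-out `none` is never
-- reached on inputs where Python terminates.
def pvLoop (a : List Int) (n : Int) : Nat → List Int → Int → Option Int
  | 0, _, _ => none
  | fuel+1, st, final =>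
    match st[0]? with
    | none => none
    | some v =>
      match pvCarry (st.set 0 (v+1)) 0 with
      | none => none
      | some st' =>
        match pvTryPrint st' a n with
        | none => none
        | some res =>
          let final' := if res ≠ 0 then 1 else final
          if st'.all (fun x => x != 0) then some final'
          else pvLoop a n fuel st' final'

-- `.getD 0` is only reachable outside Pre_ (a = [] raises IndexError in Python)
def compute_all_subsequences (a : List Int) (n : Int) : Int :=
  (pvLoop a n (2 ^ a.length) (List.replicate a.length 0) 0).getD 0

-- ===== PORT B =====
-- Source B: residues = set(); for x in a: residues |= {(r + x) % n for r in residues} | {x % n};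
-- return 1 if 0 in residues else 0.  The set comprehension over the set builds another
-- Set, and the only other consumption is a membership test, so set order cannot matter.
def compute_all_subsequences_alt (a : List Int) (n : Int) : Int :=
  let residues := a.foldl
    (fun res x =>
      PySem.Set.union res
        (PySem.Set.union (PySem.Set.ofList (res.map (fun r => PySem.Int.mod (r + x) n)))
          [PySem.Int.mod x n]))
    (PySem.Set.empty : PySem.Set Int)
  if (0 : Int) ∈ residues then 1 else 0

-- ===== PRECONDITION & SPEC =====
-- Pre_ excludes exactly the inputs where Python A raises: a = [] (IndexError on st[0])
-- and n = 0 (ZeroDivisionError at the first, nonempty, subsequence).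
def Pre_compute_all_subsequences (a : List Int) (n : Int) : Prop := a ≠ [] ∧ n ≠ 0
instance (a : List Int) (n : Int) : Decidable (Pre_compute_all_subsequences a n) := by
  unfold Pre_compute_all_subsequences; infer_instance

def pvWitness_compute_all_subsequences : List Int × Int := ([1, 2], 2)

-- On a = [] Python A raises IndexError (st[0] on the empty odometer) for every n; B returns 0.
def Raises_compute_all_subsequences (a : List Int) (n : Int) : Prop := a = []
instance (a : List Int) (n : Int) : Decidable (Raises_compute_all_subsequences a n) := by
  unfold Raises_compute_all_subsequences; infer_instance
def pvRaiseWitness_compute_all_subsequences : List Int × Int := ([], 5)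
def pvRaiseWitnessOut_compute_all_subsequences : Int := 0

def Spec_compute_all_subsequences (a : List Int) (n : Int) (out : Int) : Prop := out = compute_all_subsequences_alt a n
instance (a : List Int) (n : Int) (out : Int) : Decidable (Spec_compute_all_subsequences a n out) := by unfold Spec_compute_all_subsequences; infer_instance

-- ===== CLAIM (what is proved, stated in full; the proofs are below) =====
def Claim_equal_compute_all_subsequences : Prop := ∀ (a : List Int) (n : Int), Dom_compute_all_subsequences a n → Pre_compute_all_subsequences a n → Spec_compute_all_subsequences a n (compute_all_subsequences a n)
def Claim_raises_compute_all_subsequences : Prop := (∀ (a : List Int) (n : Int), Dom_compute_all_subsequences a n → Raises_compute_all_subsequences a n → ¬ Pre_compute_all_subsequences a n) ∧ (Dom_compute_all_subsequences (pvRaiseWitness_compute_all_subsequences.1) (pvRaiseWitness_compute_all_subsequences.2) ∧ Raises_compute_all_subsequences (pvRaiseWitness_compute_all_subsequences.1) (pvRaiseWitness_compute_all_subsequences.2) ∧ compute_all_subsequences_alt (pvRaiseWitness_compute_all_subsequences.1) (pvRaiseWitness_compute_all_subsequences.2) = pvRaiseWitnessOut_compute_all_subsequences)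

-- ===== LEMMAS AND PROOFS =====

-- the odometer state after k increments: the little-endian binary digits of k
def pvBits (L k : Nat) : List Int := (List.range L).map (fun i => if k.testBit i then 1 else 0)

-- the subsequence selected by bitmask k (in increasing index order)
def pvSub (a : List Int) (k : Nat) : List Int :=
  (List.range a.length).filterMap (fun i => if k.testBit i then a[i]? else none)

-- structural form of pvSub, convenient for sublist reasoning
def pvSel : List Int → Nat → List Int
  | [], _ => []
  | x :: xs, k => if k % 2 = 1 then x :: pvSel xs (k / 2) else pvSel xs (k / 2)

-- one step of A's flag fold, phrased over Nat masks
def pvStep (a : List Int) (n : Int) (final : Int) (k : Nat) : Int :=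
  if PySem.Int.mod (pvSub a k).sum n = 0 then 1 else final

theorem pvBits_succ (L k : Nat) :
    pvBits (L+1) k = (if k.testBit 0 then (1:Int) else 0) :: pvBits L (k/2) := by
  simp [pvBits, List.range_succ_eq_map, List.map_map, Function.comp_def, Nat.testBit_add_one]

theorem pvBits_zero (L : Nat) : pvBits L 0 = List.replicate L 0 := by
  simp [pvBits]

theorem pvCarry_inc : ∀ (L k : Nat) (pre : List Int), k + 1 < 2^(L+1) →
    pvCarry (pre ++ ((if k.testBit 0 then (1:Int) else 0) + 1) :: pvBits L (k/2)) pre.length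
      = some (pre ++ pvBits (L+1) (k+1)) := by
  intro L
  induction L with
  | zero =>
    intro k pre h
    have hk : k = 0 := by omega
    subst hk
    rw [pvCarry]
    simp [pvBits]
  | succ L ih =>
    intro k pre h
    have h2 : (2:Nat)^(L+1+1) = 2*2^(L+1) := by ring
    by_cases hb : k.testBit 0
    · -- k odd: the carry propagates one position and we recurse
      have hko : k % 2 = 1 := by simpa [Nat.testBit_zero] using hb
      rw [pvBits_succ L (k/2), pvCarry]
      have hget0 : (pre ++ ((if k.testBit 0 = true then (1:Int) else 0) + 1) :: (if (k/2).testBit 0 = true then (1:Int) else 0) :: pvBits L (k/2/2))[pre.length]? = some ((if k.testBit 0 = true then (1:Int) else 0) + 1) := by simp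
      have hget1 : (pre ++ ((if k.testBit 0 = true then (1:Int) else 0) + 1) :: (if (k/2).testBit 0 = true then (1:Int) else 0) :: pvBits L (k/2/2))[pre.length + 1]? = some (if (k/2).testBit 0 = true then (1:Int) else 0) := by simp
      simp only [hb, if_true]
      norm_num
      split
      · next heq => rw [hget1] at heq; cases heq
      next w heq =>
      rw [hget1] at heq
      injection heq with hw
      subst hw
      have hsh : pre ++ (0:Int) :: ((if (k/2).testBit 0 = true then (1:Int) else 0) + 1) :: pvBits L (k/2/2) = (pre ++ [0]) ++ ((if (k/2).testBit 0 = true then (1:Int) else 0) + 1) :: pvBits L (k/2/2) := by simp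
      have hlen : pre.length + 1 = (pre ++ [(0:Int)]).length := by simp
      rw [hsh, hlen, ih (k/2) (pre ++ [0]) (by omega)]
      rw [pvBits_succ (L+1) (k+1)]
      have hb1 : ¬ (k+1).testBit 0 := by simp [Nat.testBit_zero]; omega
      have hd : (k+1)/2 = k/2 + 1 := by omega
      simp [hb1, hd]
    · -- k even: the carry stops at the first digit
      have hke : k % 2 = 0 := by
        rcases Nat.mod_two_eq_zero_or_one k with h0 | h1
        · exact h0
        · exact absurd (by simpa [Nat.testBit_zero] using h1) hb
      rw [pvCarry]
      have hget0 : (pre ++ ((if k.testBit 0 = true then (1:Int) else 0) + 1) :: pvBits (L+1) (k/2))[pre.length]? = some ((if k.testBit 0 = true then (1:Int) else 0) + 1) := by simp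
      simp only [hb]
      norm_num
      rw [pvBits_succ (L+1) (k+1)]
      have hb1 : (k+1).testBit 0 := by simp [Nat.testBit_zero]; omega
      have hd : (k+1)/2 = k/2 := by omega
      simp [hb1, hd]

theorem pvTP_fold (a : List Int) (k : Nat) :
    ∀ (is : List Nat), (∀ i ∈ is, i < a.length) → ∀ (s : Int) (l : List Int),
    is.foldl (fun acc i =>
        match acc with
        | none => none
        | some (summ, new_a) =>
          match (pvBits a.length k)[i]?, a[i]? with
          | some sv, some x => if sv ≠ 0 then some (summ + x, new_a ++ [x]) else some (summ, new_a)
          | _, _ => none) (some (s, l))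
      = some (s + (is.filterMap (fun i => if k.testBit i then a[i]? else none)).sum,
              l ++ is.filterMap (fun i => if k.testBit i then a[i]? else none)) := by
  intro is
  induction is with
  | nil => intro _ s l; simp
  | cons i is ih =>
    intro hmem s l
    have hi : i < a.length := hmem i (by simp)
    have hst : (pvBits a.length k)[i]? = some (if k.testBit i then (1:Int) else 0) := by
      simp [pvBits, hi]
    have ha : a[i]? = some a[i] := List.getElem?_eq_getElem hi
    have ihs := ih (fun j hj => hmem j (by simp [hj]))
    by_cases hb : k.testBit i
    · have hstep : (match (some (s, l) : Option (Int × List Int)) with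
          | none => none
          | some (summ, new_a) =>
            match (pvBits a.length k)[i]?, a[i]? with
            | some sv, some x => if sv ≠ 0 then some (summ + x, new_a ++ [x]) else some (summ, new_a)
            | _, _ => none) = some (s + a[i], l ++ [a[i]]) := by
        simp [hst, ha, hb]
      rw [List.foldl_cons, hstep, ihs (s + a[i]) (l ++ [a[i]])]
      simp [ha, hb, List.append_assoc, add_assoc]
    · have hstep : (match (some (s, l) : Option (Int × List Int)) with
          | none => none
          | some (summ, new_a) =>
            match (pvBits a.length k)[i]?, a[i]? with
            | some sv, some x => if sv ≠ 0 then some (summ + x, new_a ++ [x]) else some (summ, new_a)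
            | _, _ => none) = some (s, l) := by
        simp [hst, ha, hb]
      rw [List.foldl_cons, hstep, ihs s l]
      simp [hb]

theorem pvTryPrint_bits (a : List Int) (n : Int) (k : Nat) :
    pvTryPrint (pvBits a.length k) a n
      = some (if (pvSub a k).length ≠ 0 ∧ PySem.Int.mod (pvSub a k).sum n = 0 then 1 else 0) := by
  rw [pvTryPrint, pvTP_fold a k (List.range a.length) (fun i hi => List.mem_range.mp hi) 0 []]
  simp only [pvSub, zero_add, List.nil_append]
  split_ifs <;> rfl

theorem pvBits_allOnes (L k : Nat) (h : k < 2^L) :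
    ((pvBits L k).all (fun x => x != 0)) = true ↔ k = 2^L - 1 := by
  simp only [pvBits, List.all_map, List.all_eq_true, List.mem_range, Function.comp_def]
  constructor
  · intro hall
    apply Nat.eq_of_testBit_eq
    intro i
    rw [Nat.testBit_two_pow_sub_one]
    by_cases hi : i < L
    · have hx := hall i hi
      by_cases hbt : k.testBit i
      · simp [hbt, hi]
      · simp [hbt] at hx
    · have hlt : k < 2^i := lt_of_lt_of_le h (Nat.pow_le_pow_right (by omega) (by omega))
      simp [Nat.testBit_eq_false_of_lt hlt, hi]
  · intro hk i hi
    subst hk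
    simp [Nat.testBit_two_pow_sub_one, hi]

theorem pvSub_ne_nil (a : List Int) (k : Nat) (h1 : 1 ≤ k) (h2 : k < 2^a.length) :
    (pvSub a k).length ≠ 0 := by
  intro h0
  have hnil : pvSub a k = [] := List.eq_nil_of_length_eq_zero h0
  rw [pvSub, List.filterMap_eq_nil_iff] at hnil
  have hk0 : k = 0 := by
    apply Nat.eq_of_testBit_eq
    intro i
    simp only [Nat.zero_testBit]
    by_cases hi : i < a.length
    · have hx := hnil i (List.mem_range.mpr hi)
      by_cases hbt : k.testBit i
      · simp [hbt, List.getElem?_eq_getElem hi] at hx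
      · simp [hbt]
    · have hlt : k < 2^i := lt_of_lt_of_le h2 (Nat.pow_le_pow_right (by omega) (by omega))
      simp [Nat.testBit_eq_false_of_lt hlt]
  omega

theorem pvLoop_eq (a : List Int) (n : Int) :
    ∀ (fuel k : Nat) (final : Int), k + 1 < 2^a.length → 2^a.length - 1 - k ≤ fuel →
    pvLoop a n fuel (pvBits a.length k) final
      = some ((List.range' (k+1) (2^a.length - 1 - k)).foldl (pvStep a n) final) := by
  intro fuel
  induction fuel with
  | zero =>
    intro k final h1 h2
    omega
  | succ fuel ih =>
    intro k final h1 h2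
    obtain ⟨L, hL⟩ : ∃ L, a.length = L + 1 := by
      cases ha : a.length with
      | zero => rw [ha] at h1; norm_num at h1
      | succ L => exact ⟨L, rfl⟩
    rw [pvLoop]
    have hbits : pvBits a.length k = (if k.testBit 0 then (1:Int) else 0) :: pvBits L (k/2) := by
      rw [hL, pvBits_succ]
    rw [hbits]
    simp only [List.getElem?_cons_zero, List.set_cons_zero]
    have hc := pvCarry_inc L k [] (by rw [hL] at h1; exact h1)
    simp only [List.nil_append, List.length_nil] at hc
    rw [hc, ← hL]
    simp only []
    rw [pvTryPrint_bits]
    have hne : (pvSub a (k+1)).length ≠ 0 := pvSub_ne_nil a (k+1) (by omega) h1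
    have hres : (if (pvSub a (k+1)).length ≠ 0 ∧ PySem.Int.mod (pvSub a (k+1)).sum n = 0 then (1:Int) else 0)
        = (if PySem.Int.mod (pvSub a (k+1)).sum n = 0 then (1:Int) else 0) := by
      simp [hne]
    rw [hres]
    have hfin : (if (if PySem.Int.mod (pvSub a (k+1)).sum n = 0 then (1:Int) else 0) ≠ 0 then (1:Int) else final)
        = pvStep a n final (k+1) := by
      unfold pvStep
      split_ifs <;> simp_all
    simp only [hfin]
    by_cases hlast : k + 1 = 2^a.length - 1
    · have hall : ((pvBits a.length (k+1)).all (fun x => x != 0)) = true :=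
        (pvBits_allOnes a.length (k+1) (by omega)).mpr hlast
      rw [if_pos hall]
      have hone : 2^a.length - 1 - k = 1 := by omega
      rw [hone]
      rfl
    · have hall : ¬ (((pvBits a.length (k+1)).all (fun x => x != 0)) = true) := by
        rw [pvBits_allOnes a.length (k+1) (by omega)]
        exact hlast
      rw [if_neg hall]
      rw [ih (k+1) (pvStep a n final (k+1)) (by omega) (by omega)]
      have hsp : 2^a.length - 1 - k = (2^a.length - 1 - (k+1)) + 1 := by omega
      rw [hsp, List.range'_succ, List.foldl_cons]

-- the flag fold of A computes "1 if some listed mask qualifies, else the initial flag"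
theorem pvFoldStep (a : List Int) (n : Int) :
    ∀ (l : List Nat) (final : Int),
    l.foldl (pvStep a n) final
      = if ∃ k ∈ l, PySem.Int.mod (pvSub a k).sum n = 0 then 1 else final := by
  intro l
  induction l with
  | nil => intro final; simp
  | cons k l ih =>
    intro final
    rw [List.foldl_cons]
    by_cases hk : PySem.Int.mod (pvSub a k).sum n = 0
    · have h1 : pvStep a n final k = 1 := by simp [pvStep, hk]
      rw [h1, ih 1]
      have : ∃ j ∈ k :: l, PySem.Int.mod (pvSub a j).sum n = 0 := ⟨k, by simp, hk⟩
      simp only [this]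
      split_ifs <;> rfl
    · have h1 : pvStep a n final k = final := by simp [pvStep, hk]
      rw [h1, ih final]
      have hiff : (∃ j ∈ k :: l, PySem.Int.mod (pvSub a j).sum n = 0)
          ↔ (∃ j ∈ l, PySem.Int.mod (pvSub a j).sum n = 0) := by
        constructor
        · rintro ⟨j, hj, hjm⟩
          rcases List.mem_cons.mp hj with rfl | hj'
          · exact absurd hjm hk
          · exact ⟨j, hj', hjm⟩
        · rintro ⟨j, hj, hjm⟩
          exact ⟨j, by simp [hj], hjm⟩
      exact if_congr hiff.symm rfl rfl

-- Python's % absorbs an inner % on the left summand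
theorem pvModAdd (x b n : Int) :
    PySem.Int.mod (PySem.Int.mod x n + b) n = PySem.Int.mod (x + b) n := by
  show ((x.fmod n) + b).fmod n = (x + b).fmod n
  conv_lhs => rw [Int.fmod_def x n]
  have h : x - n * (x.fdiv n) + b = (x + b) + n * (-(x.fdiv n)) := by ring
  rw [h, Int.add_mul_fmod_self_left]

-- membership in B's residue set: exactly the sums of nonempty sublists, mod n,
-- plus what the initial set S already generates
theorem pvResMem (n : Int) :
    ∀ (l : List Int) (S : PySem.Set Int) (r : Int),
    r ∈ l.foldl
      (fun res x =>
        PySem.Set.union res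
          (PySem.Set.union (PySem.Set.ofList (res.map (fun r => PySem.Int.mod (r + x) n)))
            [PySem.Int.mod x n])) S
    ↔ r ∈ S ∨ ∃ t, t.Sublist l ∧ t ≠ [] ∧
        (r = PySem.Int.mod t.sum n ∨ ∃ r0 ∈ S, r = PySem.Int.mod (r0 + t.sum) n) := by
  intro l
  induction l with
  | nil =>
    intro S r
    simp [List.sublist_nil]
  | cons x xs ih =>
    intro S r
    rw [List.foldl_cons, ih]
    have hS' : ∀ y : Int,
        y ∈ PySem.Set.union S
            (PySem.Set.union (PySem.Set.ofList (S.map (fun r => PySem.Int.mod (r + x) n)))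
              [PySem.Int.mod x n])
        ↔ y ∈ S ∨ (∃ r0 ∈ S, y = PySem.Int.mod (r0 + x) n) ∨ y = PySem.Int.mod x n := by
      intro y
      rw [PySem.Set.mem_union, PySem.Set.mem_union, PySem.Set.mem_ofList, List.mem_map]
      constructor
      · rintro (h | (⟨r0, hr0, heq⟩ | h))
        · exact Or.inl h
        · exact Or.inr (Or.inl ⟨r0, hr0, heq.symm⟩)
        · exact Or.inr (Or.inr (by simpa using h))
      · rintro (h | (⟨r0, hr0, heq⟩ | heq))
        · exact Or.inl h
        · exact Or.inr (Or.inl ⟨r0, hr0, heq.symm⟩)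
        · exact Or.inr (Or.inr (by simp [heq]))
    constructor
    · rintro (hin | ⟨t, hsub, hne, harm⟩)
      · rcases (hS' r).mp hin with h | ⟨r0, hr0, heq⟩ | heq
        · exact Or.inl h
        · exact Or.inr ⟨[x], by simp, by simp, Or.inr ⟨r0, hr0, by simpa using heq⟩⟩
        · exact Or.inr ⟨[x], by simp, by simp, Or.inl (by simpa using heq)⟩
      · rcases harm with heq | ⟨r0', hr0', heq⟩
        · exact Or.inr ⟨t, hsub.cons x, hne, Or.inl heq⟩
        · rcases (hS' r0').mp hr0' with h | ⟨r0, hr0, heq0⟩ | heq0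
          · exact Or.inr ⟨t, hsub.cons x, hne, Or.inr ⟨r0', h, heq⟩⟩
          · refine Or.inr ⟨x :: t, List.cons_sublist_cons.mpr hsub, by simp,
              Or.inr ⟨r0, hr0, ?_⟩⟩
            rw [heq, heq0, pvModAdd, List.sum_cons]
            congr 1
            ring
          · refine Or.inr ⟨x :: t, List.cons_sublist_cons.mpr hsub, by simp, Or.inl ?_⟩
            rw [heq, heq0, pvModAdd, List.sum_cons]
    · rintro (hin | ⟨t, hsub, hne, harm⟩)
      · exact Or.inl ((hS' r).mpr (Or.inl hin))
      · rcases List.sublist_cons_iff.mp hsub with hsub' | ⟨t', ht, hsub'⟩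
        · rcases harm with heq | ⟨r0, hr0, heq⟩
          · exact Or.inr ⟨t, hsub', hne, Or.inl heq⟩
          · exact Or.inr ⟨t, hsub', hne, Or.inr ⟨r0, (hS' r0).mpr (Or.inl hr0), heq⟩⟩
        · subst ht
          rcases ht' : t' with _ | ⟨y, ys⟩
          · subst ht'
            rcases harm with heq | ⟨r0, hr0, heq⟩
            · exact Or.inl ((hS' _).mpr (Or.inr (Or.inr (by simpa using heq))))
            · exact Or.inl ((hS' _).mpr (Or.inr (Or.inl ⟨r0, hr0, by simpa using heq⟩)))
          · subst ht'
            rcases harm with heq | ⟨r0, hr0, heq⟩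
            · refine Or.inr ⟨y :: ys, hsub', by simp, Or.inr
                ⟨PySem.Int.mod x n, (hS' _).mpr (Or.inr (Or.inr rfl)), ?_⟩⟩
              rw [heq, pvModAdd, List.sum_cons]
            · refine Or.inr ⟨y :: ys, hsub', by simp, Or.inr
                ⟨PySem.Int.mod (r0 + x) n, (hS' _).mpr (Or.inr (Or.inl ⟨r0, hr0, rfl⟩)), ?_⟩⟩
              rw [heq, pvModAdd, List.sum_cons]
              congr 1
              ring

theorem pvSub_cons (x : Int) (xs : List Int) (k : Nat) :
    pvSub (x :: xs) k = (if k % 2 = 1 then [x] else []) ++ pvSub xs (k / 2) := by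
  rw [pvSub, List.length_cons, List.range_succ_eq_map, List.filterMap_cons, List.filterMap_map]
  have hf : ((fun i => if k.testBit i then (x :: xs)[i]? else none) ∘ Nat.succ)
      = (fun i => if (k / 2).testBit i then xs[i]? else none) := by
    funext i
    simp [Nat.succ_eq_add_one, Nat.testBit_add_one]
  rw [hf]
  have hb : k.testBit 0 = decide (k % 2 = 1) := by
    rw [Nat.testBit_zero]
  by_cases h : k % 2 = 1 <;> simp [pvSub, hb, h]

theorem pvSub_eq_pvSel : ∀ (a : List Int) (k : Nat), pvSub a k = pvSel a k := by
  intro a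
  induction a with
  | nil => intro k; simp [pvSub, pvSel]
  | cons x xs ih =>
    intro k
    rw [pvSub_cons, pvSel, ih]
    by_cases h : k % 2 = 1 <;> simp [h]

theorem pvSel_sublist : ∀ (a : List Int) (k : Nat), (pvSel a k).Sublist a := by
  intro a
  induction a with
  | nil => intro k; simp [pvSel]
  | cons x xs ih =>
    intro k
    rw [pvSel]
    by_cases h : k % 2 = 1
    · rw [if_pos h]
      exact (ih (k / 2)).cons₂ x
    · rw [if_neg h]
      exact (ih (k / 2)).cons x

theorem pvSel_surj : ∀ {t a : List Int}, t.Sublist a →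
    ∃ k, k < 2 ^ a.length ∧ pvSel a k = t ∧ (t ≠ [] → 1 ≤ k) := by
  intro t a h
  induction h with
  | slnil => exact ⟨0, by norm_num, rfl, by simp⟩
  | @cons t xs x hsub ih =>
    obtain ⟨k, hk, hsel, hpos⟩ := ih
    refine ⟨2 * k, by rw [List.length_cons, pow_succ]; omega, ?_, ?_⟩
    · rw [pvSel]
      have h2 : ¬ (2 * k % 2 = 1) := by omega
      have h3 : 2 * k / 2 = k := by omega
      rw [if_neg h2, h3, hsel]
    · intro hne
      have := hpos hne
      omega
  | @cons₂ t xs x hsub ih =>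
    obtain ⟨k, hk, hsel, _⟩ := ih
    refine ⟨2 * k + 1, by rw [List.length_cons, pow_succ]; omega, ?_, by omega⟩
    rw [pvSel]
    have h2 : (2 * k + 1) % 2 = 1 := by omega
    have h3 : (2 * k + 1) / 2 = k := by omega
    rw [if_pos h2, h3, hsel]

-- masks in [1, 2^len) are exactly the nonempty sublists
theorem pvMaskSublist (a : List Int) (n : Int) :
    (∃ k, 1 ≤ k ∧ k < 2 ^ a.length ∧ PySem.Int.mod (pvSub a k).sum n = 0)
    ↔ (∃ t, t.Sublist a ∧ t ≠ [] ∧ PySem.Int.mod t.sum n = 0) := by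
  constructor
  · rintro ⟨k, h1, h2, hm⟩
    refine ⟨pvSub a k, ?_, ?_, hm⟩
    · rw [pvSub_eq_pvSel]; exact pvSel_sublist a k
    · intro h0
      exact pvSub_ne_nil a k h1 h2 (by rw [h0]; rfl)
  · rintro ⟨t, hsub, hne, hm⟩
    obtain ⟨k, hk, hsel, hpos⟩ := pvSel_surj hsub
    exact ⟨k, hpos hne, hk, by rw [pvSub_eq_pvSel, hsel]; exact hm⟩

-- ===== VERDICT (by name: the statement is the Claim_ definition above) =====
theorem compute_all_subsequences_spec : Claim_equal_compute_all_subsequences := by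
  intro a n _ hpre
  unfold Spec_compute_all_subsequences
  have hB : compute_all_subsequences_alt a n
      = if (0:Int) ∈ a.foldl
          (fun res x =>
            PySem.Set.union res
              (PySem.Set.union (PySem.Set.ofList (res.map (fun r => PySem.Int.mod (r + x) n)))
                [PySem.Int.mod x n])) (PySem.Set.empty : PySem.Set Int)
        then 1 else 0 := rfl
  rw [compute_all_subsequences, hB]
  have hlen : 1 ≤ a.length := by
    cases a with
    | nil => exact absurd rfl hpre.1
    | cons x xs => simp
  have h1 : 0 + 1 < 2^a.length := by
    have h2 : (2:Nat)^1 ≤ 2^a.length := Nat.pow_le_pow_right (by omega) hlen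
    omega
  rw [← pvBits_zero, pvLoop_eq a n (2^a.length) 0 0 h1 (by omega)]
  rw [Option.getD_some, pvFoldStep]
  have hempty : ∀ y : Int, y ∉ (PySem.Set.empty : PySem.Set Int) := by
    intro y hy
    simp [PySem.Set.empty] at hy
  have hcond : (∃ k ∈ List.range' (0+1) (2^a.length - 1 - 0), PySem.Int.mod (pvSub a k).sum n = 0)
      ↔ (0:Int) ∈ a.foldl
          (fun res x =>
            PySem.Set.union res
              (PySem.Set.union (PySem.Set.ofList (res.map (fun r => PySem.Int.mod (r + x) n)))
                [PySem.Int.mod x n])) (PySem.Set.empty : PySem.Set Int) := by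
    rw [pvResMem n a]
    constructor
    · rintro ⟨k, hk, hm⟩
      have hr := List.mem_range'_1.mp hk
      have hx : ∃ k, 1 ≤ k ∧ k < 2 ^ a.length ∧ PySem.Int.mod (pvSub a k).sum n = 0 :=
        ⟨k, by omega, by omega, hm⟩
      obtain ⟨t, hsub, hne, hm'⟩ := (pvMaskSublist a n).mp hx
      exact Or.inr ⟨t, hsub, hne, Or.inl hm'.symm⟩
    · rintro (h | ⟨t, hsub, hne, heq | ⟨r0, hr0, _⟩⟩)
      · exact absurd h (hempty 0)
      · obtain ⟨k, h1k, h2k, hm⟩ := (pvMaskSublist a n).mpr ⟨t, hsub, hne, heq.symm⟩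
        exact ⟨k, List.mem_range'_1.mpr ⟨by omega, by omega⟩, hm⟩
      · exact absurd hr0 (hempty r0)
  exact if_congr hcond rfl rfl

@[simp] theorem compute_all_subsequences_raises : Claim_raises_compute_all_subsequences := by
  unfold Claim_raises_compute_all_subsequences
  constructor
  · intro a n _ hr hp; exact hp.1 hr
  · exact ⟨by decide, by decide, by decide⟩
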